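-- pv_equiv track=rewrite | github.com/garywelz/copernicus-web | cloud-run-backend/main.py | _strip_legacy_tagline
-- ===== SOURCE A (Python) =====
-- from typing import Optional, List
--
-- LEGACY_DESCRIPTION_TAGLINES = {
--     "Follow Copernicus AI for more cutting-edge science discussions and research explorations.",
--     "**Follow Copernicus AI for more cutting-edge science discussions and research explorations.**",
-- }
--
-- def _strip_legacy_tagline(markdown_text: Optional[str]) -> str:
--     """Remove legacy marketing taglines from generated descriptions."""
--     if not markdown_text:
--         return ""
--     cleaned_lines = []
--     for line in markdown_text.splitlines():
--         if line.strip() in LEGACY_DESCRIPTION_TAGLINES: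
--             continue
--         cleaned_lines.append(line)
--     cleaned = "\n".join(cleaned_lines).strip()
--     while "\n\n\n" in cleaned:
--         cleaned = cleaned.replace("\n\n\n", "\n\n")
--     return cleaned
-- ===== SOURCE B (Python) =====
-- from typing import Optional
--
-- LEGACY_DESCRIPTION_TAGLINES = {
--     "Follow Copernicus AI for more cutting-edge science discussions and research explorations.",
--     "**Follow Copernicus AI for more cutting-edge science discussions and research explorations.**",
-- }
--
-- def _strip_legacy_tagline(markdown_text: Optional[str]) -> str:
--     """Remove legacy marketing taglines; single forward pass, at most one blank line in a row."""
--     if not markdown_text: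
--         return ""
--     result = []
--     prev_blank = False
--     for line in markdown_text.splitlines():
--         if line.strip() in LEGACY_DESCRIPTION_TAGLINES:
--             continue
--         if line == "" and prev_blank:
--             continue
--         result.append(line)
--         prev_blank = (line == "")
--     return "\n".join(result).strip()
-- ===== Notes on version B (the rewrite author's own statement) =====
-- stated objective: simpler
-- what changed: Replaces A's repeated whole-string triple-newline replace fixpoint loop (after a separate filter pass) by a single forward pass over the lines that skips tagline lines and keeps at most one consecutive blank line, then joins and strips once.
import Mathlib
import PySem

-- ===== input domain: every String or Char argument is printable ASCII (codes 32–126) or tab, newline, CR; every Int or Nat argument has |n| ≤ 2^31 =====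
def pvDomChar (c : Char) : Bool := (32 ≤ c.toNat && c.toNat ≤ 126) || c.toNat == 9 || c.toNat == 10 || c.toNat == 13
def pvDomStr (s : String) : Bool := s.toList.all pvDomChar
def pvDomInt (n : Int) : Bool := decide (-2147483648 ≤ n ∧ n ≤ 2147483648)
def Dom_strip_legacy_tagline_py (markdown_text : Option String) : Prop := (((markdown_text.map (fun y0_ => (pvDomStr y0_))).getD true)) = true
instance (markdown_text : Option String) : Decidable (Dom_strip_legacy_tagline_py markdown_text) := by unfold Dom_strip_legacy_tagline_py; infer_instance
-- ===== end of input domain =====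

-- B replaces A's repeated triple-newline-replace fixpoint loop by a single forward pass that
-- keeps at most one consecutive blank line; same return value (objective: simpler).

-- ===== PORT A =====
-- the module constant LEGACY_DESCRIPTION_TAGLINES (a Python set of two strings)
def pvTaglines : PySem.Set (List Char) :=
  PySem.Set.ofList
    [ "Follow Copernicus AI for more cutting-edge science discussions and research explorations.".toList,
      "**Follow Copernicus AI for more cutting-edge science discussions and research explorations.**".toList ]

-- termination facts for A's `while "\n\n\n" in cleaned` loop (the replace output is strictly shorter)
theorem pvReplaceGo_length_le :
    ∀ (fuel : Nat) (l acc : List Char),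
      (PySem.Chars.replace.go ['\n','\n','\n'] ['\n','\n'] fuel l acc).length ≤ acc.length + l.length := by
  intro fuel
  induction fuel with
  | zero => intro l acc; simp [PySem.Chars.replace.go]
  | succ fuel ih =>
    intro l acc
    cases l with
    | nil => simp [PySem.Chars.replace.go]
    | cons c t =>
      simp only [PySem.Chars.replace.go]
      by_cases hp : List.isPrefixOf ['\n','\n','\n'] (c :: t) = true
      · rw [if_pos hp]
        obtain ⟨rest, hrest⟩ := List.isPrefixOf_iff_prefix.mp hp
        have hdrop : List.drop (['\n','\n','\n'] : List Char).length (c :: t) = rest := by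
          rw [← hrest]; exact List.drop_left
        have hlen : (c :: t).length = 3 + rest.length := by
          rw [← hrest]; simp; omega
        calc (PySem.Chars.replace.go ['\n','\n','\n'] ['\n','\n'] fuel
                (List.drop (['\n','\n','\n'] : List Char).length (c :: t))
                ((['\n','\n'] : List Char).reverse ++ acc)).length
            ≤ ((['\n','\n'] : List Char).reverse ++ acc).length
                + (List.drop (['\n','\n','\n'] : List Char).length (c :: t)).length := ih _ _
          _ ≤ acc.length + (c :: t).length := by rw [hdrop]; simp [hlen]; omega
      · rw [if_neg hp]
        calc (PySem.Chars.replace.go ['\n','\n','\n'] ['\n','\n'] fuel t (c :: acc)).length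
            ≤ (c :: acc).length + t.length := ih _ _
          _ = acc.length + (c :: t).length := by simp; omega

theorem pvReplaceGo_length_lt :
    ∀ (fuel : Nat) (l acc : List Char), l.length ≤ fuel → ['\n','\n','\n'] <:+: l →
      (PySem.Chars.replace.go ['\n','\n','\n'] ['\n','\n'] fuel l acc).length < acc.length + l.length := by
  intro fuel
  induction fuel with
  | zero =>
    intro l acc hf hinf
    exfalso
    have h3 := hinf.sublist.length_le
    simp at h3
    omega
  | succ fuel ih =>
    intro l acc hf hinf
    cases l with
    | nil =>
      exfalso
      have := hinf.sublist.length_le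
      simp at this
    | cons c t =>
      simp only [PySem.Chars.replace.go]
      by_cases hp : List.isPrefixOf ['\n','\n','\n'] (c :: t) = true
      · rw [if_pos hp]
        obtain ⟨rest, hrest⟩ := List.isPrefixOf_iff_prefix.mp hp
        have hdrop : List.drop (['\n','\n','\n'] : List Char).length (c :: t) = rest := by
          rw [← hrest]; exact List.drop_left
        have hlen : (c :: t).length = 3 + rest.length := by
          rw [← hrest]; simp; omega
        have hle := pvReplaceGo_length_le fuel
          (List.drop (['\n','\n','\n'] : List Char).length (c :: t))
          ((['\n','\n'] : List Char).reverse ++ acc)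
        rw [hdrop] at hle ⊢
        have hf2 : t.length = rest.length + 2 := by
          have hc := congrArg List.length hrest
          simp at hc
          omega
        simp at hle ⊢
        omega
      · rw [if_neg hp]
        have hinft : ['\n','\n','\n'] <:+: t := by
          rcases List.infix_cons_iff.mp hinf with hpre | htail
          · exact absurd (List.isPrefixOf_iff_prefix.mpr hpre) hp
          · exact htail
        have := ih t (c :: acc) (by simpa using Nat.lt_succ_iff.mp (by simpa using hf)) hinft
        simp at this ⊢
        omega

theorem pvReplace_length_lt (s : List Char)
    (h : PySem.Chars.isIn ['\n','\n','\n'] s = true) :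
    (PySem.Chars.replace s ['\n','\n','\n'] ['\n','\n']).length < s.length := by
  have hinf : ['\n','\n','\n'] <:+: s := (PySem.Chars.isIn_iff_infix _ _).mp h
  have := pvReplaceGo_length_lt s.length s [] le_rfl hinf
  simpa [PySem.Chars.replace] using this

-- `while "\n\n\n" in cleaned: cleaned = cleaned.replace("\n\n\n", "\n\n")`
def pvWhileCollapse (s : List Char) : List Char :=
  if h : PySem.Chars.isIn ['\n','\n','\n'] s = true then
    pvWhileCollapse (PySem.Chars.replace s ['\n','\n','\n'] ['\n','\n'])
  else s
termination_by s.length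
decreasing_by exact pvReplace_length_lt s h

def strip_legacy_tagline_py (markdown_text : Option String) : String :=
  match markdown_text with
  | none => ""
  | some s =>
    if s.toList = [] then ""
    else
      let cleaned_lines : List (List Char) :=
        (PySem.Chars.splitlines s.toList).foldl
          (fun acc line =>
            if PySem.Set.contains pvTaglines (PySem.Chars.strip line) then acc
            else acc ++ [line]) []
      let cleaned := PySem.Chars.strip (PySem.Chars.join ['\n'] cleaned_lines)
      String.ofList (pvWhileCollapse cleaned)

-- ===== PORT B =====
def strip_legacy_tagline_py_alt (markdown_text : Option String) : String :=
  match markdown_text with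
  | none => ""
  | some s =>
    if s.toList = [] then ""
    else
      let st : List (List Char) × Bool :=
        (PySem.Chars.splitlines s.toList).foldl
          (fun st line =>
            if PySem.Set.contains pvTaglines (PySem.Chars.strip line) then st
            else if line.isEmpty && st.2 then st
            else (st.1 ++ [line], line.isEmpty)) ([], false)
      String.ofList (PySem.Chars.strip (PySem.Chars.join ['\n'] st.1))

-- ===== PRECONDITION & SPEC =====
def Spec_strip_legacy_tagline_py (markdown_text : Option String) (out : String) : Prop := out = strip_legacy_tagline_py_alt markdown_text
instance (markdown_text : Option String) (out : String) : Decidable (Spec_strip_legacy_tagline_py markdown_text out) := by unfold Spec_strip_legacy_tagline_py; infer_instance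

-- ===== CLAIM (what is proved, stated in full; the proofs are below) =====
def Claim_equal_strip_legacy_tagline_py : Prop := ∀ (markdown_text : Option String), Dom_strip_legacy_tagline_py markdown_text → Spec_strip_legacy_tagline_py markdown_text (strip_legacy_tagline_py markdown_text)

-- ===== LEMMAS AND PROOFS =====

-- one-pass collapse of every run of ≥ 3 '\n' down to 2 (the fixpoint of A's rewrite)
def pvCollapse : List Char → List Char
  | [] => []
  | c :: r =>
    if c = '\n' ∧ r.take 2 = ['\n', '\n'] then pvCollapse r
    else c :: pvCollapse r

def pvKeep (line : List Char) : Bool :=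
  !(PySem.Set.contains pvTaglines (PySem.Chars.strip line))

-- blank-line dedup at the line level (flag = "previously kept line was blank")
def pvDedup : Bool → List (List Char) → List (List Char)
  | _, [] => []
  | b, l :: r => if l.isEmpty && b then pvDedup b r else l :: pvDedup l.isEmpty r

theorem pvCollapse_cons_pos {c : Char} {r : List Char}
    (h : c = '\n' ∧ r.take 2 = ['\n', '\n']) : pvCollapse (c :: r) = pvCollapse r := by
  simp [pvCollapse, h]

theorem pvCollapse_cons_neg {c : Char} {r : List Char}
    (h : ¬(c = '\n' ∧ r.take 2 = ['\n', '\n'])) : pvCollapse (c :: r) = c :: pvCollapse r := by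
  simp [pvCollapse, h]

-- A-side loop shape: the filter
theorem pvFoldFilter (L : List (List Char)) : ∀ acc : List (List Char),
    L.foldl (fun acc line =>
      if PySem.Set.contains pvTaglines (PySem.Chars.strip line) then acc else acc ++ [line]) acc
      = acc ++ L.filter pvKeep := by
  induction L with
  | nil => simp
  | cons l r ih =>
    intro acc
    rw [List.foldl_cons, List.filter_cons]
    cases hb : PySem.Set.contains pvTaglines (PySem.Chars.strip l) with
    | true =>
      have hk : pvKeep l = false := by
        show (!(PySem.Set.contains pvTaglines (PySem.Chars.strip l))) = false
        rw [hb]; rfl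
      rw [if_pos rfl, ih, hk]
      simp
    | false =>
      have hk : pvKeep l = true := by
        show (!(PySem.Set.contains pvTaglines (PySem.Chars.strip l))) = true
        rw [hb]; rfl
      rw [if_neg (by simp), ih, hk]
      simp

-- B-side loop shape: fused filter + dedup
theorem pvFoldDedup (L : List (List Char)) : ∀ (acc : List (List Char)) (b : Bool),
    (L.foldl (fun st line =>
        if PySem.Set.contains pvTaglines (PySem.Chars.strip line) then st
        else if line.isEmpty && st.2 then st
        else (st.1 ++ [line], line.isEmpty)) (acc, b)).1
      = acc ++ pvDedup b (L.filter pvKeep) := by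
  induction L with
  | nil => simp [pvDedup]
  | cons l r ih =>
    intro acc b
    rw [List.foldl_cons, List.filter_cons]
    cases hb : PySem.Set.contains pvTaglines (PySem.Chars.strip l) with
    | true =>
      have hk : pvKeep l = false := by
        show (!(PySem.Set.contains pvTaglines (PySem.Chars.strip l))) = false
        rw [hb]; rfl
      rw [if_pos rfl, ih, hk]
      simp
    | false =>
      have hk : pvKeep l = true := by
        show (!(PySem.Set.contains pvTaglines (PySem.Chars.strip l))) = true
        rw [hb]; rfl
      rw [if_neg (by simp), hk, if_pos rfl]
      show (List.foldl _ (if (l.isEmpty && b) = true then (acc, b) else (acc ++ [l], l.isEmpty)) r).1 = _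
      cases he : (l.isEmpty && b) with
      | true =>
        have hd : pvDedup b (l :: List.filter pvKeep r) = pvDedup b (List.filter pvKeep r) := by
          simp [pvDedup, he]
        rw [if_pos rfl, ih, hd]
      | false =>
        have hd : pvDedup b (l :: List.filter pvKeep r) = l :: pvDedup l.isEmpty (List.filter pvKeep r) := by
          simp [pvDedup, he]
        rw [if_neg (by simp), ih, hd]
        simp

-- splitlines produces newline-free lines
theorem pvSplitlines_go_ok (isB : Char → Bool) (hB : isB '\n' = true) :
    ∀ (s cur : List Char) (acc : List (List Char)),
      ('\n' : Char) ∉ cur → (∀ l ∈ acc, ('\n' : Char) ∉ l) →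
      ∀ l ∈ PySem.Chars.splitlines.go isB s cur acc, ('\n' : Char) ∉ l := by
  intro s cur acc
  induction s, cur, acc using PySem.Chars.splitlines.go.induct (isB := isB) with
  | case1 cur acc hemp =>
    intro hcur hacc l hl
    rw [PySem.Chars.splitlines.go.eq_1, if_pos hemp] at hl
    exact hacc l (List.mem_reverse.mp hl)
  | case2 cur acc hemp =>
    intro hcur hacc l hl
    rw [PySem.Chars.splitlines.go.eq_1, if_neg hemp] at hl
    rcases List.mem_cons.mp (List.mem_reverse.mp hl) with h1 | h2
    · rw [h1]; simpa using hcur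
    · exact hacc l h2
  | case3 rest cur acc ih =>
    intro hcur hacc l hl
    rw [PySem.Chars.splitlines.go.eq_2] at hl
    refine ih (by simp) ?_ l hl
    intro l' hl'
    rcases List.mem_cons.mp hl' with h1 | h2
    · rw [h1]; simpa using hcur
    · exact hacc l' h2
  | case4 c rest cur acc hne hBc ih =>
    intro hcur hacc l hl
    rw [PySem.Chars.splitlines.go.eq_3 _ _ _ _ _ hne, if_pos hBc] at hl
    refine ih (by simp) ?_ l hl
    intro l' hl'
    rcases List.mem_cons.mp hl' with h1 | h2
    · rw [h1]; simpa using hcur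
    · exact hacc l' h2
  | case5 c rest cur acc hne hBc ih =>
    intro hcur hacc l hl
    rw [PySem.Chars.splitlines.go.eq_3 _ _ _ _ _ hne, if_neg hBc] at hl
    refine ih ?_ hacc l hl
    intro hm
    rcases List.mem_cons.mp hm with h1 | h2
    · rw [← h1] at hBc
      rw [hB] at hBc
      exact hBc rfl
    · exact hcur h2

theorem pvSplitlines_ok (s : List Char) :
    ∀ l ∈ PySem.Chars.splitlines s, ('\n' : Char) ∉ l := by
  intro l hl
  simp only [PySem.Chars.splitlines] at hl
  exact pvSplitlines_go_ok _ (by decide) s [] [] (by simp) (by simp) l hl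

-- the while-loop computes pvCollapse
theorem pvCollapse_eq_self {s : List Char} (h : ¬ ['\n','\n','\n'] <:+: s) : pvCollapse s = s := by
  induction s with
  | nil => rfl
  | cons c r ih =>
    by_cases hc : c = '\n' ∧ r.take 2 = ['\n','\n']
    · exfalso
      obtain ⟨hc1, hc2⟩ := hc
      rcases r with _ | ⟨a, _ | ⟨b, r'⟩⟩ <;> simp at hc2
      obtain ⟨ha, hb⟩ := hc2
      subst hc1; subst ha; subst hb
      exact h ⟨[], r', rfl⟩
    · rw [pvCollapse_cons_neg hc, ih (fun hi => h (List.infix_cons hi))]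

theorem pvCollapse_append_triple (r : List Char) :
    ∀ x : List Char, pvCollapse (x ++ '\n' :: '\n' :: '\n' :: r) = pvCollapse (x ++ '\n' :: '\n' :: r) := by
  intro x
  induction x with
  | nil =>
    rw [List.nil_append, List.nil_append,
      pvCollapse_cons_pos ⟨rfl, by simp⟩]
  | cons d x' ih =>
    have hiff : (x' ++ '\n' :: '\n' :: '\n' :: r).take 2 = ['\n','\n']
        ↔ (x' ++ '\n' :: '\n' :: r).take 2 = ['\n','\n'] := by
      rcases x' with _ | ⟨a, _ | ⟨b, x''⟩⟩ <;> simp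
    by_cases hd : d = '\n' ∧ (x' ++ '\n' :: '\n' :: '\n' :: r).take 2 = ['\n','\n']
    · rw [List.cons_append, List.cons_append, pvCollapse_cons_pos hd,
        pvCollapse_cons_pos ⟨hd.1, hiff.mp hd.2⟩, ih]
    · rw [List.cons_append, List.cons_append, pvCollapse_cons_neg hd,
        pvCollapse_cons_neg (fun hx => hd ⟨hx.1, hiff.mpr hx.2⟩), ih]

theorem pvCollapse_go (fuel : Nat) : ∀ l acc : List Char,
    pvCollapse (PySem.Chars.replace.go ['\n','\n','\n'] ['\n','\n'] fuel l acc)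
      = pvCollapse (acc.reverse ++ l) := by
  induction fuel with
  | zero => intro l acc; simp [PySem.Chars.replace.go]
  | succ fuel ih =>
    intro l acc
    cases l with
    | nil => simp [PySem.Chars.replace.go]
    | cons c t =>
      simp only [PySem.Chars.replace.go]
      by_cases hp : List.isPrefixOf ['\n','\n','\n'] (c :: t) = true
      · rw [if_pos hp]
        obtain ⟨rest, hrest⟩ := List.isPrefixOf_iff_prefix.mp hp
        have hdrop : List.drop (['\n','\n','\n'] : List Char).length (c :: t) = rest := by
          rw [← hrest]; exact List.drop_left
        rw [hdrop, ih]
        have h1 : ((['\n','\n'] : List Char).reverse ++ acc).reverse ++ rest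
            = acc.reverse ++ '\n' :: '\n' :: rest := by simp
        have h2 : acc.reverse ++ ((['\n','\n','\n'] : List Char) ++ rest)
            = acc.reverse ++ '\n' :: '\n' :: '\n' :: rest := by simp
        rw [h1, ← hrest, h2, pvCollapse_append_triple rest acc.reverse]
      · rw [if_neg hp, ih]
        simp

theorem pvCollapse_replace (s : List Char) :
    pvCollapse (PySem.Chars.replace s ['\n','\n','\n'] ['\n','\n']) = pvCollapse s := by
  have := pvCollapse_go s.length s []
  simpa [PySem.Chars.replace] using this

theorem pvWhileCollapse_eq (s : List Char) : pvWhileCollapse s = pvCollapse s := by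
  have H : ∀ (n : Nat) (s : List Char), s.length ≤ n → pvWhileCollapse s = pvCollapse s := by
    intro n
    induction n with
    | zero =>
      intro s hs
      have hnil : s = [] := List.eq_nil_of_length_eq_zero (Nat.le_zero.mp hs)
      subst hnil
      rw [pvWhileCollapse, dif_neg (by decide)]
      rfl
    | succ n ih =>
      intro s hs
      rw [pvWhileCollapse]
      by_cases h : PySem.Chars.isIn ['\n','\n','\n'] s = true
      · rw [dif_pos h, ih _ (by have := pvReplace_length_lt s h; omega), pvCollapse_replace]
      · rw [dif_neg h]
        refine (pvCollapse_eq_self ?_).symm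
        rw [← PySem.Chars.isIn_iff_infix]
        simp only [Bool.not_eq_true] at h
        simp [h]
  exact H s.length s le_rfl

-- collapse commutes with strip
theorem pvCollapse_lstrip (s : List Char) :
    pvCollapse (PySem.Chars.lstrip s) = PySem.Chars.lstrip (pvCollapse s) := by
  induction s with
  | nil => rfl
  | cons c r ih =>
    by_cases hc : c = '\n' ∧ r.take 2 = ['\n','\n']
    · rw [pvCollapse_cons_pos hc]
      have hw : PySem.Chars.isspace c = true := by rw [hc.1]; decide
      rw [show PySem.Chars.lstrip (c :: r) = PySem.Chars.lstrip r from by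
        simp [PySem.Chars.lstrip, List.dropWhile_cons, hw]]
      exact ih
    · rw [pvCollapse_cons_neg hc]
      by_cases hw : PySem.Chars.isspace c = true
      · rw [show PySem.Chars.lstrip (c :: r) = PySem.Chars.lstrip r from by
          simp [PySem.Chars.lstrip, List.dropWhile_cons, hw]]
        rw [show PySem.Chars.lstrip (c :: pvCollapse r) = PySem.Chars.lstrip (pvCollapse r) from by
          simp [PySem.Chars.lstrip, List.dropWhile_cons, hw]]
        exact ih
      · have hw' : PySem.Chars.isspace c = false := by simpa [Bool.not_eq_true] using hw
        rw [show PySem.Chars.lstrip (c :: r) = c :: r from by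
          simp [PySem.Chars.lstrip, List.dropWhile_cons, hw']]
        rw [show PySem.Chars.lstrip (c :: pvCollapse r) = c :: pvCollapse r from by
          simp [PySem.Chars.lstrip, List.dropWhile_cons, hw']]
        exact pvCollapse_cons_neg hc

theorem pvCollapse_append_singleton {c : Char} (hc : c ≠ '\n') :
    ∀ x : List Char, pvCollapse (x ++ [c]) = pvCollapse x ++ [c] := by
  have haux : ∀ r : List Char, ((r ++ [c]).take 2 = ['\n','\n'] ↔ r.take 2 = ['\n','\n']) := by
    intro r
    rcases r with _ | ⟨a, _ | ⟨b, r''⟩⟩ <;> simp [hc]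
  intro x
  induction x with
  | nil => simp [pvCollapse, hc]
  | cons d x' ih =>
    by_cases hd : d = '\n' ∧ (x' ++ [c]).take 2 = ['\n','\n']
    · rw [List.cons_append, pvCollapse_cons_pos hd,
        pvCollapse_cons_pos ⟨hd.1, (haux x').mp hd.2⟩, ih]
    · rw [List.cons_append, pvCollapse_cons_neg hd,
        pvCollapse_cons_neg (fun hx => hd ⟨hx.1, (haux x').mpr hx.2⟩), ih]
      simp

theorem pvCollapse_append_split {y : List Char} {c : Char} (hc : c ≠ '\n') :
    ∀ w : List Char, pvCollapse (y ++ [c] ++ w) = pvCollapse (y ++ [c]) ++ pvCollapse w := by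
  intro w
  induction y with
  | nil =>
    simp only [List.nil_append]
    rw [List.singleton_append, pvCollapse_cons_neg (fun hx => hc hx.1)]
    simp [pvCollapse, hc]
  | cons d y' ih =>
    have hiff : ((y' ++ [c] ++ w).take 2 = ['\n','\n'] ↔ (y' ++ [c]).take 2 = ['\n','\n']) := by
      rcases y' with _ | ⟨a, _ | ⟨b, y''⟩⟩ <;> simp [hc]
    by_cases hd : d = '\n' ∧ (y' ++ [c] ++ w).take 2 = ['\n','\n']
    · rw [List.cons_append, List.cons_append, pvCollapse_cons_pos hd,
        pvCollapse_cons_pos ⟨hd.1, hiff.mp hd.2⟩]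
      exact ih
    · rw [List.cons_append, List.cons_append, pvCollapse_cons_neg hd,
        pvCollapse_cons_neg (fun hx => hd ⟨hx.1, hiff.mpr hx.2⟩), ih]
      simp

theorem pvCollapse_allws : ∀ (w : List Char), (∀ c ∈ w, PySem.Chars.isspace c = true) →
    ∀ c ∈ pvCollapse w, PySem.Chars.isspace c = true := by
  intro w
  induction w with
  | nil => intro _ c hc; simp [pvCollapse] at hc
  | cons d r ih =>
    intro h c hc
    by_cases hd : d = '\n' ∧ r.take 2 = ['\n','\n']
    · rw [pvCollapse_cons_pos hd] at hc
      exact ih (fun x hx => h x (List.mem_cons_of_mem _ hx)) c hc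
    · rw [pvCollapse_cons_neg hd] at hc
      rcases List.mem_cons.mp hc with rfl | hc'
      · exact h c (List.mem_cons_self)
      · exact ih (fun x hx => h x (List.mem_cons_of_mem _ hx)) c hc'

theorem pvLstrip_ws_append {w : List Char} (h : ∀ c ∈ w, PySem.Chars.isspace c = true)
    (x : List Char) : PySem.Chars.lstrip (w ++ x) = PySem.Chars.lstrip x := by
  simp only [PySem.Chars.lstrip, List.dropWhile_append]
  have hw : w.dropWhile PySem.Chars.isspace = [] := List.dropWhile_eq_nil_iff.mpr h
  simp [hw]

theorem pvRstrip_append_ws {w : List Char} (h : ∀ c ∈ w, PySem.Chars.isspace c = true)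
    (x : List Char) : PySem.Chars.rstrip (x ++ w) = PySem.Chars.rstrip x := by
  simp only [PySem.Chars.rstrip, List.reverse_append, List.dropWhile_append]
  have hw : w.reverse.dropWhile PySem.Chars.isspace = [] :=
    List.dropWhile_eq_nil_iff.mpr (fun c hc => h c (List.mem_reverse.mp hc))
  simp [hw]

theorem pvRstrip_ends_nonws {c : Char} (hc : PySem.Chars.isspace c = false) (z : List Char) :
    PySem.Chars.rstrip (z ++ [c]) = z ++ [c] := by
  simp [PySem.Chars.rstrip, List.dropWhile_cons, hc]

theorem pvCollapse_rstrip (s : List Char) :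
    pvCollapse (PySem.Chars.rstrip s) = PySem.Chars.rstrip (pvCollapse s) := by
  have hsplit : s = (s.reverse.dropWhile PySem.Chars.isspace).reverse
      ++ (s.reverse.takeWhile PySem.Chars.isspace).reverse := by
    rw [← List.reverse_append, List.takeWhile_append_dropWhile, List.reverse_reverse]
  have hwall : ∀ c ∈ (s.reverse.takeWhile PySem.Chars.isspace).reverse,
      PySem.Chars.isspace c = true := by
    intro c hcmem
    exact List.mem_takeWhile_imp (List.mem_reverse.mp hcmem)
  have hrs : PySem.Chars.rstrip s = (s.reverse.dropWhile PySem.Chars.isspace).reverse := rfl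
  cases hd : s.reverse.dropWhile PySem.Chars.isspace with
  | nil =>
    have hall : ∀ c ∈ s, PySem.Chars.isspace c = true := by
      intro c hcmem
      exact List.dropWhile_eq_nil_iff.mp hd c (List.mem_reverse.mpr hcmem)
    rw [hrs, hd]
    have hcall := pvCollapse_allws s hall
    have : (pvCollapse s).reverse.dropWhile PySem.Chars.isspace = [] :=
      List.dropWhile_eq_nil_iff.mpr (fun c hc => hcall c (List.mem_reverse.mp hc))
    simp [pvCollapse, PySem.Chars.rstrip, this]
  | cons d0 d' =>
    have hd0 : PySem.Chars.isspace d0 = false := by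
      have h0 : ¬ PySem.Chars.isspace ((s.reverse.dropWhile PySem.Chars.isspace)[0]'(by simp [hd]))
          = true := List.dropWhile_get_zero_not _ _ (by simp [hd])
      simp only [hd] at h0
      simpa [Bool.not_eq_true] using h0
    have hd0nl : d0 ≠ '\n' := by
      intro hh; rw [hh] at hd0; exact absurd hd0 (by decide)
    have hy : (s.reverse.dropWhile PySem.Chars.isspace).reverse = d'.reverse ++ [d0] := by
      rw [hd]; simp
    rw [hrs, hy]
    conv_rhs => rw [hsplit, hy, pvCollapse_append_split hd0nl]
    rw [pvRstrip_append_ws (pvCollapse_allws _ hwall)]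
    rw [pvCollapse_append_singleton hd0nl d'.reverse]
    rw [pvRstrip_ends_nonws hd0]

theorem pvCollapse_strip (s : List Char) :
    pvCollapse (PySem.Chars.strip s) = PySem.Chars.strip (pvCollapse s) := by
  simp only [PySem.Chars.strip]
  rw [pvCollapse_rstrip, pvCollapse_lstrip]

-- strip ignores all-whitespace ends
theorem pvStrip_ws_ends {w₁ w₂ : List Char}
    (h₁ : ∀ c ∈ w₁, PySem.Chars.isspace c = true) (h₂ : ∀ c ∈ w₂, PySem.Chars.isspace c = true)
    (x : List Char) :
    PySem.Chars.strip (w₁ ++ (x ++ w₂)) = PySem.Chars.strip x := by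
  simp only [PySem.Chars.strip]
  rw [pvLstrip_ws_append h₁]
  cases hx : List.dropWhile PySem.Chars.isspace x with
  | nil =>
    have hxw : PySem.Chars.lstrip (x ++ w₂) = [] := by
      simp only [PySem.Chars.lstrip, List.dropWhile_append, hx]
      simp [List.dropWhile_eq_nil_iff.mpr h₂]
    have hx0 : PySem.Chars.lstrip x = [] := hx
    rw [hxw, hx0]
  | cons a u =>
    have h1 : PySem.Chars.lstrip (x ++ w₂) = PySem.Chars.lstrip x ++ w₂ := by
      simp only [PySem.Chars.lstrip, List.dropWhile_append, hx]
      simp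
    rw [h1, pvRstrip_append_ws h₂]

-- line-level lemmas
theorem pvJoin_cons {Y : List (List Char)} (hY : Y ≠ []) (y : List Char) :
    PySem.Chars.join ['\n'] (y :: Y) = y ++ '\n' :: PySem.Chars.join ['\n'] Y := by
  cases Y with
  | nil => exact absurd rfl hY
  | cons z Y' =>
    rw [PySem.Chars.join_cons_cons]
    simp

theorem pvJoin_head {Y : List (List Char)} {y : List Char} (hy : y ≠ []) (hh : Y.head? = some y) :
    (PySem.Chars.join ['\n'] Y).head? = y.head? := by
  cases Y with
  | nil => simp at hh
  | cons z Y' =>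
    have hz : z = y := by simpa using hh
    subst hz
    cases Y' with
    | nil => rw [PySem.Chars.join_singleton]
    | cons w W =>
      rw [PySem.Chars.join_cons_cons]
      cases z with
      | nil => exact absurd rfl hy
      | cons c t => simp

theorem pvJoin_rep_append (a : Nat) (X : List (List Char)) (hX : X ≠ []) :
    PySem.Chars.join ['\n'] (List.replicate a [] ++ X)
      = List.replicate a '\n' ++ PySem.Chars.join ['\n'] X := by
  induction a with
  | zero => simp
  | succ a ih =>
    rw [List.replicate_succ, List.cons_append,
      pvJoin_cons (by simp [hX]) [], ih]
    simp [List.replicate_succ]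

theorem pvJoin_append_nil : ∀ (Y : List (List Char)), Y ≠ [] →
    PySem.Chars.join ['\n'] (Y ++ [[]]) = PySem.Chars.join ['\n'] Y ++ ['\n'] := by
  intro Y
  induction Y with
  | nil => intro h; exact absurd rfl h
  | cons y Y' ih =>
    intro _
    cases hY' : Y' with
    | nil =>
      subst hY'
      rw [List.singleton_append, PySem.Chars.join_cons_cons,
        PySem.Chars.join_singleton, PySem.Chars.join_singleton]
      simp
    | cons z W =>
      rw [← hY', List.cons_append, pvJoin_cons (by simp [hY']) y,
        pvJoin_cons (by simp [hY']) y, ih (by simp [hY'])]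
      simp

theorem pvJoin_append_rep (b : Nat) (X : List (List Char)) (hX : X ≠ []) :
    PySem.Chars.join ['\n'] (X ++ List.replicate b [])
      = PySem.Chars.join ['\n'] X ++ List.replicate b '\n' := by
  induction b with
  | zero => simp
  | succ b ih =>
    rw [List.replicate_succ', ← List.append_assoc,
      pvJoin_append_nil _ (by simp [hX]), ih]
    simp [List.replicate_succ']

theorem pvDedup_append (R : List (List Char)) :
    ∀ (C : List (List Char)) (b₀ : Bool), C ≠ [] → (∀ x, C.getLast? = some x → x ≠ []) →
      pvDedup b₀ (C ++ R) = pvDedup b₀ C ++ pvDedup false R := by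
  intro C
  induction C with
  | nil => intro b₀ h; exact absurd rfl h
  | cons l r ih =>
    intro b₀ _ hlast
    cases hr : r with
    | nil =>
      subst hr
      have hl : l ≠ [] := hlast l rfl
      have hle : l.isEmpty = false := by simpa [List.isEmpty_iff] using hl
      simp [pvDedup, hle]
    | cons l' r' =>
      have hrne : r ≠ [] := by simp [hr]
      have hlast' : ∀ x, r.getLast? = some x → x ≠ [] := by
        intro x hx
        exact hlast x (by rw [hr] at hx ⊢; rwa [List.getLast?_cons_cons])
      rw [← hr]
      simp only [List.cons_append, pvDedup]
      by_cases hb : (l.isEmpty && b₀) = true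
      · simp only [hb, if_true, ih b₀ hrne hlast']
      · simp only [hb, if_false, Bool.false_eq_true, ih l.isEmpty hrne hlast',
          List.cons_append]

theorem pvDedup_rep_cons (a : Nat) (X : List (List Char)) (l : List Char) (hl : l ≠ []) :
    pvDedup false (List.replicate a [] ++ l :: X)
      = List.replicate (min a 1) [] ++ pvDedup false (l :: X) := by
  have hle : l.isEmpty = false := by simpa [List.isEmpty_iff] using hl
  have key : ∀ a : Nat, pvDedup true (List.replicate a [] ++ l :: X) = pvDedup false (l :: X) := by
    intro a
    induction a with
    | zero => simp [pvDedup, hle]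
    | succ a ih => simpa [List.replicate_succ, pvDedup] using ih
  cases a with
  | zero => simp
  | succ a =>
    have hm : min (a + 1) 1 = 1 := by omega
    simp only [List.replicate_succ, List.cons_append, pvDedup, List.isEmpty_nil, Bool.true_and,
      Bool.and_false, if_false, Bool.false_eq_true]
    simp [key a, hm, pvDedup, hle]

theorem pvDedup_true_rep (b : Nat) : pvDedup true (List.replicate b []) = [] := by
  induction b with
  | zero => rfl
  | succ b ih => simp [List.replicate_succ, pvDedup, ih]

theorem pvDedup_rep (b : Nat) : pvDedup false (List.replicate b []) = List.replicate (min b 1) [] := by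
  cases b with
  | zero => rfl
  | succ b =>
    have hm : min (b + 1) 1 = 1 := by omega
    simp [List.replicate_succ, pvDedup, pvDedup_true_rep b, hm]

theorem pvCollapse_rep_append (rest : List Char) (hr : rest.head? ≠ some '\n') :
    ∀ a : Nat, pvCollapse (List.replicate a '\n' ++ rest)
      = List.replicate (min a 2) '\n' ++ pvCollapse rest := by
  have hnotr : rest.take 2 ≠ ['\n','\n'] := by
    intro ht
    rcases rest with _ | ⟨r0, r1⟩ <;> simp at ht
    exact hr (by simp [ht.1])
  intro a
  induction a with
  | zero => simp
  | succ a ih =>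
    rw [List.replicate_succ, List.cons_append]
    match a, ih with
    | 0, _ =>
      rw [pvCollapse_cons_neg (fun hx => hnotr (by simpa using hx.2))]
      simp
    | 1, ih =>
      have hns : (List.replicate 1 '\n' ++ rest).take 2 ≠ ['\n','\n'] := by
        intro ht
        rcases hrt : rest with _ | ⟨r0, r1⟩
        · rw [hrt] at ht; simp at ht
        · rw [hrt] at ht
          simp at ht
          exact hr (by simp [hrt, ht])
      rw [pvCollapse_cons_neg (fun hx => hns hx.2), ih]
      simp
    | (k+2), ih =>
      have hc : (List.replicate (k+2) '\n' ++ rest).take 2 = ['\n','\n'] := by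
        simp [List.replicate_succ]
      rw [pvCollapse_cons_pos ⟨rfl, hc⟩, ih]
      have h1 : min (k+2) 2 = 2 := by omega
      have h2 : min (k+2+1) 2 = 2 := by omega
      rw [h1, h2]

theorem pvCollapse_line_append {l : List Char} (hl : ('\n' : Char) ∉ l) (z : List Char) :
    pvCollapse (l ++ z) = l ++ pvCollapse z := by
  induction l with
  | nil => simp
  | cons c l' ih =>
    have hc : c ≠ '\n' := fun hh => hl (hh ▸ List.mem_cons_self)
    rw [List.cons_append, pvCollapse_cons_neg (fun hx => hc hx.1),
      ih (fun hh => hl (List.mem_cons_of_mem _ hh))]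
    rfl

theorem pvJoin_rep_nil : ∀ (n : Nat),
    PySem.Chars.join ['\n'] (List.replicate n ([] : List Char)) = List.replicate (n - 1) '\n' := by
  intro n
  induction n with
  | zero => rfl
  | succ n ih =>
    cases n with
    | zero => rfl
    | succ m =>
      rw [List.replicate_succ, pvJoin_cons (by simp) [], ih]
      simp [List.replicate_succ]

theorem pvStrip_rep (m : Nat) : PySem.Chars.strip (List.replicate m '\n') = [] := by
  have h1 : List.dropWhile PySem.Chars.isspace (List.replicate m '\n') = [] := by
    apply List.dropWhile_eq_nil_iff.mpr
    intro x hx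
    rw [List.eq_of_mem_replicate hx]
    decide
  simp [PySem.Chars.strip, PySem.Chars.lstrip, PySem.Chars.rstrip, h1]

theorem pvDropWhile_head_false {α : Type} (p : α → Bool) :
    ∀ (l : List α) (x : α) (xs : List α), l.dropWhile p = x :: xs → p x = false := by
  intro l
  induction l with
  | nil => intro x xs h; simp at h
  | cons a t ih =>
    intro x xs h
    rw [List.dropWhile_cons] at h
    by_cases hp : p a = true
    · rw [if_pos hp] at h
      exact ih x xs h
    · rw [if_neg hp] at h
      obtain ⟨h1, -⟩ := List.cons.inj h
      rw [← h1]
      simpa [Bool.not_eq_true] using hp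

-- the core lemma: on a block starting and ending with a nonblank line,
-- collapsing newline runs = deduplicating blank lines
theorem pvCore (n : Nat) : ∀ (C : List (List Char)) (b : Nat), C.length ≤ n →
    C ≠ [] → (∀ x, C.head? = some x → x ≠ []) → (∀ x, C.getLast? = some x → x ≠ []) →
    (∀ l ∈ C, ('\n' : Char) ∉ l) →
    pvCollapse (PySem.Chars.join ['\n'] C ++ List.replicate b '\n')
      = PySem.Chars.join ['\n'] (pvDedup false C) ++ List.replicate (min b 2) '\n' := by
  induction n with
  | zero =>
    intro C b hlen hne _ _ _
    exact absurd (List.eq_nil_of_length_eq_zero (Nat.le_zero.mp hlen)) hne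
  | succ n ih =>
    intro C b hlen hne hhd hlast hok
    obtain ⟨l, rest, rfl⟩ := List.exists_cons_of_ne_nil hne
    have hl : l ≠ [] := hhd l rfl
    have hlE : l.isEmpty = false := by simpa [List.isEmpty_iff] using hl
    have hnl : ('\n' : Char) ∉ l := hok l List.mem_cons_self
    cases hrest : rest with
    | nil =>
      subst hrest
      rw [PySem.Chars.join_singleton, pvCollapse_line_append hnl,
        show pvCollapse (List.replicate b '\n') = List.replicate (min b 2) '\n' from by
          have h0 := pvCollapse_rep_append [] (by simp) b; simpa [pvCollapse] using h0]
      simp [pvDedup, hlE, PySem.Chars.join_singleton, pvCollapse]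
    | cons r0 rest' =>
      have hrne : rest ≠ [] := by simp [hrest]
      rw [← hrest]
      cases hdrop : rest.dropWhile (fun x => x.isEmpty) with
      | nil =>
        exfalso
        have hall : ∀ x ∈ rest, x.isEmpty = true := List.dropWhile_eq_nil_iff.mp hdrop
        have hlastC : (l :: rest).getLast? = rest.getLast? := by
          rw [hrest]; exact List.getLast?_cons_cons
        have hx : rest.getLast? = some (rest.getLast hrne) := List.getLast?_eq_getLast hrne
        have hxne : rest.getLast hrne ≠ [] := hlast _ (by rw [hlastC]; exact hx)
        have hxmem : rest.getLast hrne ∈ rest := List.getLast_mem hrne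
        have := hall _ hxmem
        exact hxne (by simpa [List.isEmpty_iff] using this)
      | cons l' M =>
        have hl' : l'.isEmpty = false := pvDropWhile_head_false _ rest l' M hdrop
        have hl'ne : l' ≠ [] := by simpa [List.isEmpty_iff] using hl'
        set k := (rest.takeWhile (fun x => x.isEmpty)).length with hkdef
        have htake : rest.takeWhile (fun x => x.isEmpty) = List.replicate k [] := by
          rw [hkdef]
          apply List.eq_replicate_of_mem
          intro x hx
          have hxe := List.mem_takeWhile_imp hx
          simpa [List.isEmpty_iff] using hxe
        have hrestq : rest = List.replicate k [] ++ l' :: M := by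
          conv_lhs => rw [← List.takeWhile_append_dropWhile
            (p := fun x : List Char => x.isEmpty) (l := rest)]
          rw [htake, hdrop]
        have hlenC' : (l' :: M).length ≤ n := by
          have h1 := congrArg List.length hrestq
          simp at h1 hlen
          simp only [List.length_cons]
          omega
        have hok' : ∀ x ∈ l' :: M, ('\n' : Char) ∉ x := by
          intro x hx
          apply hok
          apply List.mem_cons_of_mem
          rw [hrestq]
          exact List.mem_append_right _ hx
        have hlastCM : (l :: rest).getLast? = (l' :: M).getLast? := by
          rw [hrestq, ← List.cons_append,
            List.getLast?_append_of_ne_nil _ (by simp)]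
        have hlast' : ∀ x, (l' :: M).getLast? = some x → x ≠ [] := by
          intro x hx
          exact hlast x (by rw [hlastCM]; exact hx)
        have hhd' : ∀ x, (l' :: M).head? = some x → x ≠ [] := by
          intro x hx
          simp at hx
          rwa [← hx]
        have IH := ih (l' :: M) b hlenC' (by simp) hhd' hlast' hok'
        have hDeq : pvDedup false (l' :: M) = l' :: pvDedup l'.isEmpty M := by
          simp [pvDedup, hl']
        have hDne : pvDedup false (l' :: M) ≠ [] := by simp [hDeq]
        -- head of the tail block is l'.head, not a newline
        obtain ⟨c0, l'', rfl⟩ := List.exists_cons_of_ne_nil hl'ne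
        have hc0 : c0 ≠ '\n' := by
          intro hh
          exact hok' _ List.mem_cons_self (hh ▸ List.mem_cons_self)
        have hjh : (PySem.Chars.join ['\n'] ((c0 :: l'') :: M)).head? = some c0 :=
          pvJoin_head (y := c0 :: l'') (by simp) rfl
        obtain ⟨j', hj⟩ : ∃ j', PySem.Chars.join ['\n'] ((c0 :: l'') :: M) = c0 :: j' := by
          cases hJ : PySem.Chars.join ['\n'] ((c0 :: l'') :: M) with
          | nil => rw [hJ] at hjh; simp at hjh
          | cons a j' =>
            rw [hJ] at hjh
            simp at hjh
            exact ⟨j', by rw [hjh]⟩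
        -- LHS computation
        rw [hrestq, pvJoin_cons (by simp) l, pvJoin_rep_append k _ (by simp)]
        have hassoc : (l ++ '\n' :: (List.replicate k '\n'
              ++ PySem.Chars.join ['\n'] ((c0 :: l'') :: M))) ++ List.replicate b '\n'
            = l ++ (List.replicate (k+1) '\n'
              ++ (PySem.Chars.join ['\n'] ((c0 :: l'') :: M) ++ List.replicate b '\n')) := by
          simp [List.replicate_succ, List.append_assoc]
        rw [hassoc, pvCollapse_line_append hnl,
          pvCollapse_rep_append _ (by rw [hj]; simp [hc0]) (k+1), IH]
        -- RHS computation
        have hDC : pvDedup false (l :: (List.replicate k [] ++ (c0 :: l'') :: M))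
            = l :: (List.replicate (min k 1) [] ++ pvDedup false ((c0 :: l'') :: M)) := by
          have h1 : pvDedup false (l :: (List.replicate k [] ++ (c0 :: l'') :: M))
              = l :: pvDedup false (List.replicate k [] ++ (c0 :: l'') :: M) := by
            simp [pvDedup, hlE]
          rw [h1, pvDedup_rep_cons k M (c0 :: l'') (by simp)]
        rw [hDC, pvJoin_cons (by simp [hDne]) l, pvJoin_rep_append (min k 1) _ hDne]
        have hmin : min (k+1) 2 = min k 1 + 1 := by omega
        rw [hmin]
        simp [List.replicate_succ, List.append_assoc]

theorem pvMain (L : List (List Char)) (hok : ∀ l ∈ L, ('\n' : Char) ∉ l) :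
    PySem.Chars.strip (pvCollapse (PySem.Chars.join ['\n'] L))
      = PySem.Chars.strip (PySem.Chars.join ['\n'] (pvDedup false L)) := by
  cases hL1 : L.dropWhile (fun x => x.isEmpty) with
  | nil =>
    have hall : ∀ x ∈ L, x.isEmpty = true := List.dropWhile_eq_nil_iff.mp hL1
    have hrepL : L = List.replicate L.length [] := by
      apply List.eq_replicate_of_mem
      intro x hx
      simpa [List.isEmpty_iff] using hall x hx
    cases hL : L with
    | nil => rfl
    | cons l0 Lr =>
      rw [← hL, hrepL, pvJoin_rep_nil, pvDedup_rep,
        show pvCollapse (List.replicate (L.length - 1) '\n')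
            = List.replicate (min (L.length - 1) 2) '\n' from by
          have h0 := pvCollapse_rep_append [] (by simp) (L.length - 1)
          simpa [pvCollapse] using h0,
        pvStrip_rep]
      have hmin : min L.length 1 = 1 := by
        have : L.length = Lr.length + 1 := by rw [hL]; rfl
        omega
      rw [hmin, pvJoin_rep_nil, pvStrip_rep]
  | cons l L1r =>
    have hlE : l.isEmpty = false := pvDropWhile_head_false _ L l L1r hL1
    have hlne : l ≠ [] := by simpa [List.isEmpty_iff] using hlE
    set a := (L.takeWhile (fun x => x.isEmpty)).length with hadef
    have htake : L.takeWhile (fun x => x.isEmpty) = List.replicate a [] := by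
      rw [hadef]
      apply List.eq_replicate_of_mem
      intro x hx
      simpa [List.isEmpty_iff] using List.mem_takeWhile_imp hx
    have hsplitL : L = List.replicate a [] ++ (l :: L1r) := by
      conv_lhs => rw [← List.takeWhile_append_dropWhile
        (p := fun x : List Char => x.isEmpty) (l := L)]
      rw [htake, hL1]
    -- trailing decomposition of R := l :: L1r
    cases hcr : (l :: L1r).reverse.dropWhile (fun x => x.isEmpty) with
    | nil =>
      exfalso
      have hall := List.dropWhile_eq_nil_iff.mp hcr
      have := hall l (by simp)
      rw [List.isEmpty_iff] at this
      exact hlne this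
    | cons e Cr' =>
      have heE : e.isEmpty = false := pvDropWhile_head_false _ _ e Cr' hcr
      have hene : e ≠ [] := by simpa [List.isEmpty_iff] using heE
      set b := ((l :: L1r).reverse.takeWhile (fun x => x.isEmpty)).length with hbdef
      have htakeB : (l :: L1r).reverse.takeWhile (fun x => x.isEmpty)
          = List.replicate b [] := by
        rw [hbdef]
        apply List.eq_replicate_of_mem
        intro x hx
        simpa [List.isEmpty_iff] using List.mem_takeWhile_imp hx
      have hRsplit : l :: L1r = (e :: Cr').reverse ++ List.replicate b [] := by
        conv_lhs => rw [← List.reverse_reverse (l :: L1r),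
          ← List.takeWhile_append_dropWhile
            (p := fun x : List Char => x.isEmpty) (l := (l :: L1r).reverse)]
        rw [htakeB, hcr]
        simp
      -- C := (e :: Cr').reverse; C = l :: C₂
      have hCne : (e :: Cr').reverse ≠ [] := by simp
      obtain ⟨c1, C2, hC⟩ := List.exists_cons_of_ne_nil hCne
      have hc1 : c1 = l := by
        have h0 := congrArg List.head? hRsplit
        rw [hC] at h0
        simpa using h0.symm
      subst hc1
      have hClast : (c1 :: C2).getLast? = some e := by
        rw [← hC]
        simp
      have hCok : ∀ x ∈ c1 :: C2, ('\n' : Char) ∉ x := by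
        intro x hx
        apply hok
        rw [hsplitL, hRsplit, hC]
        exact List.mem_append_right _ (List.mem_append_left _ hx)
      have hChd : ∀ x, (c1 :: C2).head? = some x → x ≠ [] := by
        intro x hx
        simp at hx
        rwa [← hx]
      have hClastNe : ∀ x, (c1 :: C2).getLast? = some x → x ≠ [] := by
        intro x hx
        rw [hClast] at hx
        simp at hx
        rwa [← hx]
      -- head char of join (c1 :: C2)
      obtain ⟨c0, l0, hc1eq⟩ := List.exists_cons_of_ne_nil hlne
      have hc0 : c0 ≠ '\n' := by
        intro hh
        exact hCok c1 List.mem_cons_self (by rw [hc1eq, hh]; exact List.mem_cons_self)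
      have hjh : (PySem.Chars.join ['\n'] (c1 :: C2)).head? = some c0 := by
        rw [hc1eq] at *
        exact pvJoin_head (y := c0 :: l0) (by simp) rfl
      obtain ⟨j', hj⟩ : ∃ j', PySem.Chars.join ['\n'] (c1 :: C2) = c0 :: j' := by
        cases hJ : PySem.Chars.join ['\n'] (c1 :: C2) with
        | nil => rw [hJ] at hjh; simp at hjh
        | cons x j' =>
          rw [hJ] at hjh
          simp at hjh
          exact ⟨j', by rw [hjh]⟩
      have hws : ∀ (m : Nat) (c : Char), c ∈ List.replicate m '\n' → PySem.Chars.isspace c = true := by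
        intro m c hc
        rw [List.eq_of_mem_replicate hc]
        decide
      -- A side
      have hCore := pvCore (c1 :: C2).length (c1 :: C2) b le_rfl (by simp) hChd hClastNe hCok
      have hAside : pvCollapse (PySem.Chars.join ['\n'] L)
          = List.replicate (min a 2) '\n'
            ++ (PySem.Chars.join ['\n'] (pvDedup false (c1 :: C2))
                ++ List.replicate (min b 2) '\n') := by
        rw [hsplitL, hRsplit, hC,
          pvJoin_rep_append a _ (by simp),
          pvJoin_append_rep b _ (by simp),
          pvCollapse_rep_append _ (by rw [hj]; simp [hc0]) a]
        rw [hCore]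
      -- B side
      have hD : pvDedup false (c1 :: C2) = c1 :: pvDedup c1.isEmpty C2 := by
        have : c1.isEmpty = false := hlE
        simp [pvDedup, this]
      have hDne : pvDedup false (c1 :: C2) ≠ [] := by simp [hD]
      have hBside : pvDedup false L = List.replicate (min a 1) []
          ++ (pvDedup false (c1 :: C2) ++ List.replicate (min b 1) []) := by
        rw [hsplitL, hRsplit, hC, List.cons_append,
          pvDedup_rep_cons a _ c1 hlne,
          ← List.cons_append,
          pvDedup_append _ (c1 :: C2) false (by simp) hClastNe,
          pvDedup_rep b]
      rw [hAside, hBside,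
        pvJoin_rep_append (min a 1) _ (by simp [hDne]),
        pvJoin_append_rep (min b 1) _ hDne]
      rw [pvStrip_ws_ends (hws (min a 2)) (hws (min b 2)),
        pvStrip_ws_ends (hws (min a 1)) (hws (min b 1))]

-- ===== VERDICT (by name: the statement is the Claim_ definition above) =====
theorem strip_legacy_tagline_py_spec : Claim_equal_strip_legacy_tagline_py := by
  intro mt _
  unfold Spec_strip_legacy_tagline_py
  match mt with
  | none => rfl
  | some s =>
    simp only [strip_legacy_tagline_py, strip_legacy_tagline_py_alt]
    by_cases hs : s.toList = []
    · simp [hs]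
    · simp only [hs, if_neg, ne_eq, not_false_iff]
      rw [pvFoldFilter, pvFoldDedup]
      simp only [List.nil_append]
      apply congrArg String.ofList
      rw [pvWhileCollapse_eq, pvCollapse_strip]
      exact pvMain _ (fun l hl => pvSplitlines_ok s.toList l (List.mem_of_mem_filter hl))
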